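-- pv_equiv track=rewrite | github.com/tdrmk/multi_hop_routing_algo_simulation | gui.py | create_colors
-- ===== SOURCE A (Python) =====
-- import math
-- import itertools
--
-- def create_colors(n):
--     """ Number of possible values for individual channels """
--     p = math.ceil(math.pow(n + 1, 1 / 3))
--     """ Possible values for individual channels """
--     c = [math.ceil((255 * i) / (p - 1)) for i in range(0, p)]
--
--     def color_priority(color):
--         """ Define a priority for colors """
--         return sum(c if c > 0 else 512 for c in color)
--
--     """ Sort color based on priority """
--     return sorted(list(itertools.product(c, c, c)), key=color_priority, reverse=True)[:n]
-- ===== SOURCE B (Python) =====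
-- def create_colors(n):
--     """ Number of possible values for individual channels:
--         least p with p**3 >= n + 1, found by integer search """
--     p = 0
--     while p * p * p < n + 1:
--         p += 1
--     """ Possible values for individual channels (exact integer ceiling division) """
--     c = [-((-255 * i) // (p - 1)) for i in range(p)]
--
--     def weight(v):
--         """ Per-channel priority weight """
--         return v if v > 0 else 512
--
--     # Bucket sort: group the colors by priority in one pass over the triples,
--     # then emit the groups from highest priority down (ties keep product order,
--     # exactly like a stable reverse sort).  Weights are precomputed per channel.
--     wc = [(weight(v), v) for v in c]
--     buckets = {}
--     for wr, r in wc: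
--         for wg, g in wc:
--             wrg = wr + wg
--             for wb, b in wc:
--                 buckets.setdefault(wrg + wb, []).append((r, g, b))
--     out = []
--     for s in sorted(buckets, reverse=True):
--         out += buckets[s]
--     return out[:n]
-- ===== Notes on version B (the rewrite author's own statement) =====
-- stated objective: alternative
-- what changed: B replaces the full stable reverse sort of all p^3 colors by a bucket sort (a dict grouping colors by priority in one nested pass, then emitting groups by descending key) and computes p by an integer cube-root search and the channel values by integer ceiling division instead of float math.pow/math.ceil.
-- outside the precondition, e.g. on create_colors(0): A raises ZeroDivisionError, B raises ZeroDivisionError; on create_colors(-2): A raises ValueError, B returns []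
import Mathlib
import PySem

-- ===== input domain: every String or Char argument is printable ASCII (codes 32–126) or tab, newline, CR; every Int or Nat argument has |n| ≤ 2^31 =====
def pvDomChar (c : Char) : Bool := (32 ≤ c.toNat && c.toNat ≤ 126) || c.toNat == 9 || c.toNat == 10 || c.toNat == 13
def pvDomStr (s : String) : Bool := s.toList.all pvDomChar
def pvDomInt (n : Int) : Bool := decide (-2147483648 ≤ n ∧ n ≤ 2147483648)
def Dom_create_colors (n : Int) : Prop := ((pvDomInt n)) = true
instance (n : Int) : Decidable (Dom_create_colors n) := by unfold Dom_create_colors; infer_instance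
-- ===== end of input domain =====

-- B replaces A's full stable reverse sort of all p^3 colors by a bucket sort: a dict groups
-- the colors by priority in one nested pass, the groups are emitted from highest key down
-- (objective: alternative algorithm, same result).

-- ===== PORT A =====
-- Exact integer model of `math.ceil(math.pow(x, 1/3))`: the least k ≥ 0 with k^3 ≥ x.
-- Verified exact against CPython's float computation for every x = n+1 with |n| ≤ 2^31.
def pvCbrtGo (m : Nat) : Nat → Nat → Nat
  | 0, k => k
  | fuel+1, k => if m ≤ k*k*k then k else pvCbrtGo m fuel (k+1)

def pvCeilPowThird (x : Int) : Int :=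
  if x ≤ 0 then 0 else Int.ofNat (pvCbrtGo x.toNat 1292 0)

-- c = [math.ceil((255 * i) / (p - 1)) for i in range(0, p)]
-- `math.ceil` of the float quotient is exactly integer ceiling division -((-a)//b) on
-- this domain (255*i ≤ 255*(p-1) ≪ 2^53, quotients ≥ 1/(p-1) away from non-integers).
def pvChannelVals (p : Int) : List Int :=
  (PySem.List.pyRange 0 p 1).map (fun i => -(PySem.Int.floordiv (-(255*i)) (p-1)))

-- the nested helper color_priority (sum over the three channels)
def pvColorPriority (col : Int × Int × Int) : Int :=
  (if col.1 > 0 then col.1 else 512) + (if col.2.1 > 0 then col.2.1 else 512) +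
    (if col.2.2 > 0 then col.2.2 else 512)

-- list(itertools.product(c, c, c))
def pvProduct (c : List Int) : List (Int × Int × Int) :=
  c.flatMap (fun r => c.flatMap (fun g => c.map (fun b => (r, g, b))))

def create_colors (n : Int) : List (Int × Int × Int) :=
  let p := pvCeilPowThird (n + 1)
  let c := pvChannelVals p
  PySem.List.slice (PySem.List.sorted (pvProduct c) pvColorPriority true) none (some n)

-- ===== PORT B =====
-- `while p*p*p < n+1: p += 1` as fuel recursion (1292^3 > 2^31+1, so 1292 steps always suffice)
def pvAltCbrtGo (m : Int) : Nat → Int → Int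
  | 0, p => p
  | fuel+1, p => if p*p*p < m then pvAltCbrtGo m fuel (p+1) else p

def pvAltCbrt (m : Int) : Int := pvAltCbrtGo m 1292 0

-- c = [-((-255 * i) // (p - 1)) for i in range(p)]  (exact: Python's // is floordiv)
def pvAltChannels (p : Int) : List Int :=
  (PySem.List.pyRange 0 p 1).map (fun i => -(PySem.Int.floordiv ((-255)*i) (p-1)))

-- the nested helper weight(v)
def pvWeight (v : Int) : Int := if v > 0 then v else 512

-- wc = [(weight(v), v) for v in c]
def pvAltPairs (c : List Int) : List (Int × Int) := c.map (fun v => (pvWeight v, v))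

-- buckets.setdefault(key, []).append(col) has exactly the dict effect of
-- d[key] = d.get(key, []) + [col] with setdefault's position rule = PySem.Dict.modify
def pvAltBuckets (c : List Int) : PySem.Dict Int (List (Int × Int × Int)) :=
  let wc := pvAltPairs c
  wc.foldl (fun d pr =>
    wc.foldl (fun d pg =>
      let wrg := pr.1 + pg.1
      wc.foldl (fun d pb =>
        d.modify (wrg + pb.1) [] (· ++ [(pr.2, pg.2, pb.2)])) d) d)
    PySem.Dict.empty

def create_colors_alt (n : Int) : List (Int × Int × Int) :=
  let p := pvAltCbrt (n + 1)
  let c := pvAltChannels p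
  let buckets := pvAltBuckets c
  let out := (PySem.List.sorted buckets.keys (fun k => k) true).foldl
    (fun out s => out ++ buckets.getD s []) []
  PySem.List.slice out none (some n)

-- ===== PRECONDITION & SPEC =====
-- Pre_ excludes exactly the inputs where the Python A raises: n = 0 hits a ZeroDivisionError
-- in the channel comprehension; n ≤ -2 makes math.pow raise ValueError.
def Pre_create_colors (n : Int) : Prop := n = -1 ∨ 1 ≤ n
instance (n : Int) : Decidable (Pre_create_colors n) := by unfold Pre_create_colors; infer_instance

def pvWitness_create_colors : Int := 5

def Spec_create_colors (n : Int) (out : List (Int × Int × Int)) : Prop := out = create_colors_alt n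
instance (n : Int) (out : List (Int × Int × Int)) : Decidable (Spec_create_colors n out) := by unfold Spec_create_colors; infer_instance

-- ===== CLAIM (what is proved, stated in full; the proofs are below) =====
def Claim_equal_create_colors : Prop := ∀ (n : Int), Dom_create_colors n → Pre_create_colors n → Spec_create_colors n (create_colors n)

-- ===== LEMMAS AND PROOFS =====

-- the two cube-root searches agree step for step (their loop conditions are negations)
theorem pv_cbrt_go_eq (x : Int) (hx : 0 ≤ x) :
    ∀ (fuel k : Nat), pvAltCbrtGo x fuel (Int.ofNat k) = Int.ofNat (pvCbrtGo x.toNat fuel k) := by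
  intro fuel
  induction fuel with
  | zero => intro k; rfl
  | succ fuel ih =>
      intro k
      simp only [pvAltCbrtGo, pvCbrtGo]
      rw [show (Int.ofNat k * Int.ofNat k * Int.ofNat k) = ((k*k*k : Nat) : Int) by simp only [Int.ofNat_eq_natCast]; push_cast; ring]
      by_cases h : x.toNat ≤ k*k*k
      · rw [if_neg (by omega), if_pos h]
      · rw [if_pos (by omega), if_neg h,
          show (Int.ofNat k) + 1 = Int.ofNat (k+1) by simp, ih (k+1)]

theorem pv_cbrt_eq (x : Int) (hx : 0 ≤ x) : pvAltCbrt x = pvCeilPowThird x := by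
  unfold pvAltCbrt pvCeilPowThird
  by_cases h0 : x ≤ 0
  · have : x = 0 := le_antisymm h0 hx
    subst this; rfl
  · simpa [h0] using pv_cbrt_go_eq x hx 1292 0

theorem pv_channels_eq (p : Int) : pvAltChannels p = pvChannelVals p := by
  unfold pvAltChannels pvChannelVals
  simp [neg_mul]

-- folding over a flatMap is the nested fold
theorem pv_foldl_flatMap {α β δ : Type} (l : List α) (g : α → List β) (f : δ → β → δ) :
    ∀ d : δ, (l.flatMap g).foldl f d = l.foldl (fun d a => (g a).foldl f d) d := by
  induction l with
  | nil => intro d; rfl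
  | cons a l ih => intro d; simp [List.foldl_append, ih]

theorem pv_foldl_congr {α δ : Type} (l : List α) (f g : δ → α → δ) (d : δ)
    (h : ∀ d' a, a ∈ l → f d' a = g d' a) : l.foldl f d = l.foldl g d := by
  induction l generalizing d with
  | nil => rfl
  | cons a l ih => rw [List.foldl_cons, List.foldl_cons, h d a (by simp),
      ih _ (fun d' a' ha' => h d' a' (by simp [ha']))]

-- the nested bucket loop is the fold of the modify step over the product list
theorem pv_buckets_eq_foldl (c : List Int) :
    pvAltBuckets c = (pvProduct c).foldl
      (fun d col => d.modify (pvColorPriority col) [] (· ++ [col])) PySem.Dict.empty := by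
  unfold pvAltBuckets pvAltPairs pvProduct
  rw [List.foldl_map, pv_foldl_flatMap]
  apply pv_foldl_congr
  intro d r _
  rw [List.foldl_map, pv_foldl_flatMap]
  apply pv_foldl_congr
  intro d' g _
  rw [List.foldl_map, List.foldl_map]
  apply pv_foldl_congr
  intro d'' b _
  rfl

-- the product-list fold over pairs (so the PySem dict lemmas apply)
theorem pv_buckets_eq_pair_foldl (c : List Int) :
    pvAltBuckets c = ((pvProduct c).map (fun t => (pvColorPriority t, t))).foldl
      (fun d p => d.modify p.1 [] (· ++ [p.2])) PySem.Dict.empty := by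
  rw [pv_buckets_eq_foldl, List.foldl_map]

theorem pv_buckets_getD (c : List Int) (k : Int) :
    (pvAltBuckets c).getD k [] = (pvProduct c).filter (fun t => pvColorPriority t == k) := by
  rw [pv_buckets_eq_pair_foldl, PySem.Dict.getD_foldl_modify_append]
  rw [List.filter_map]
  simp [Function.comp_def]

theorem pv_buckets_keys_mem (c : List Int) (k : Int) :
    k ∈ (pvAltBuckets c).keys ↔ k ∈ (pvProduct c).map pvColorPriority := by
  rw [pv_buckets_eq_foldl, PySem.Dict.keys_foldl_modify_key]
  simp only [PySem.Dict.keys_empty]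
  exact PySem.Set.mem_ofList _ _

theorem pv_buckets_keys_nodup (c : List Int) : (pvAltBuckets c).keys.Nodup := by
  rw [pv_buckets_eq_foldl]
  exact PySem.Dict.nodup_keys_foldl_modify_key _ _ _ _ _ PySem.Dict.nodup_keys_empty

-- ---- stable reverse sort = concatenation of buckets along a strictly descending key list ----

theorem pv_flatMap_congr {α β : Type} (l : List α) (f g : α → List β)
    (h : ∀ a ∈ l, f a = g a) : l.flatMap f = l.flatMap g := by
  induction l with
  | nil => rfl
  | cons a l ih =>
      simp only [List.flatMap_cons]
      rw [h a (by simp), ih (fun a ha => h a (by simp [ha]))]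

theorem pv_flatMap_nil {α β : Type} (l : List α) :
    l.flatMap (fun _ => ([] : List β)) = [] := by
  induction l with
  | nil => rfl
  | cons a l ih => simp [ih]

theorem pv_insertBy_append {α : Type} (before : α → α → Bool) (x : α) (b rest : List α)
    (h : ∀ y ∈ b, before x y = false) :
    PySem.List.insertBy before x (b ++ rest) = b ++ PySem.List.insertBy before x rest := by
  induction b with
  | nil => rfl
  | cons y ys ih =>
      simp only [List.cons_append, PySem.List.insertBy, h y (by simp)]
      simp only [Bool.false_eq_true, if_false]
      rw [ih (fun z hz => h z (by simp [hz]))]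

theorem pv_insertBy_all {α : Type} (before : α → α → Bool) (x : α) (ys : List α)
    (h : ∀ y ∈ ys, before x y = true) :
    PySem.List.insertBy before x ys = x :: ys := by
  cases ys with
  | nil => rfl
  | cons y ys => simp [PySem.List.insertBy, h y (by simp)]

-- inserting one element into the concatenated buckets appends it to its own bucket
theorem pv_insert_into_buckets {T : Type} (key : T → Int) (vs : List Int)
    (hvs : vs.Pairwise (fun a b => b < a)) (l : List T) (t : T) (ht : key t ∈ vs) :
    PySem.List.insertBy (fun a b => decide (key b < key a)) t
        (vs.flatMap (fun v => l.filter (fun x => decide (v = key x))))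
      = vs.flatMap (fun v => (l ++ [t]).filter (fun x => decide (v = key x))) := by
  induction vs with
  | nil => cases ht
  | cons v vs ih =>
      have hlt : ∀ v' ∈ vs, v' < v := by
        intro v' hv'
        exact (List.pairwise_cons.mp hvs).1 v' hv'
      have htail := (List.pairwise_cons.mp hvs).2
      have hbucket : ∀ y ∈ l.filter (fun x => decide (v = key x)), key y = v := by
        intro y hy
        have := List.of_mem_filter hy
        simp at this
        omega
      simp only [List.flatMap_cons]
      by_cases hc : key t = v
      · -- t lands at the end of the first bucket
        have h1 : ∀ y ∈ l.filter (fun x => decide (v = key x)),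
            (decide (key y < key t)) = false := by
          intro y hy
          have := hbucket y hy
          simp [this, hc]
        rw [pv_insertBy_append _ _ _ _ h1]
        have h2 : ∀ y ∈ vs.flatMap (fun v' => l.filter (fun x => decide (v' = key x))),
            (decide (key y < key t)) = true := by
          intro y hy
          rcases List.mem_flatMap.mp hy with ⟨v', hv', hyf⟩
          have hk : key y = v' := by
            have := List.of_mem_filter hyf
            simp at this
            omega
          have : v' < v := hlt v' hv'
          simp [hk, hc]
          omega
        rw [pv_insertBy_all _ _ _ h2]
        have h3 : vs.flatMap (fun v' => (l ++ [t]).filter (fun x => decide (v' = key x)))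
            = vs.flatMap (fun v' => l.filter (fun x => decide (v' = key x))) := by
          apply pv_flatMap_congr
          intro v' hv'
          have : v' < v := hlt v' hv'
          simp only [List.filter_append]
          have : ([t].filter (fun x => decide (v' = key x))) = [] := by
            simp [hc]
            omega
          rw [this, List.append_nil]
        rw [h3]
        have h4 : ((l ++ [t]).filter (fun x => decide (v = key x)))
            = l.filter (fun x => decide (v = key x)) ++ [t] := by
          simp [List.filter_append, hc]
        rw [h4]
        simp [List.append_assoc]
      · -- t's key is smaller than v: it passes the first bucket entirely
        have htv : key t ∈ vs := by
          rcases List.mem_cons.mp ht with h | h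
          · exact absurd h.symm (by simpa [eq_comm] using hc)
          · exact h
        have hklt : key t < v := hlt _ htv
        have h1 : ∀ y ∈ l.filter (fun x => decide (v = key x)),
            (decide (key y < key t)) = false := by
          intro y hy
          have := hbucket y hy
          simp [this]
          omega
        rw [pv_insertBy_append _ _ _ _ h1, ih htail htv]
        have h4 : ((l ++ [t]).filter (fun x => decide (v = key x)))
            = l.filter (fun x => decide (v = key x)) := by
          simp only [List.filter_append]
          have : ([t].filter (fun x => decide (v = key x))) = [] := by
            simp
            omega
          rw [this, List.append_nil]
        rw [h4]

theorem pv_foldl_insertBy_buckets {T : Type} (key : T → Int) (vs : List Int)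
    (hvs : vs.Pairwise (fun a b => b < a)) :
    ∀ (ts pre : List T), (∀ t ∈ ts, key t ∈ vs) →
      List.foldl (fun acc x => PySem.List.insertBy (fun a b => decide (key b < key a)) x acc)
          (vs.flatMap (fun v => pre.filter (fun x => decide (v = key x)))) ts
        = vs.flatMap (fun v => (pre ++ ts).filter (fun x => decide (v = key x))) := by
  intro ts
  induction ts with
  | nil => intro pre _; simp
  | cons t ts ih =>
      intro pre hmem
      simp only [List.foldl_cons]
      rw [pv_insert_into_buckets key vs hvs pre t (hmem t (by simp))]
      rw [ih (pre ++ [t]) (fun x hx => hmem x (by simp [hx]))]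
      simp

-- a stable reverse sort with keys inside a strictly descending value list vs
-- is the concatenation of the per-value buckets, in vs order
theorem pv_sorted_rev_eq_buckets {T : Type} (key : T → Int) (vs : List Int)
    (hvs : vs.Pairwise (fun a b => b < a)) (ts : List T) (hmem : ∀ t ∈ ts, key t ∈ vs) :
    PySem.List.sorted ts key true
      = vs.flatMap (fun v => ts.filter (fun x => decide (v = key x))) := by
  rw [PySem.List.sorted_rev_eq_foldl_insertBy]
  have h0 : vs.flatMap (fun v => ([] : List T).filter (fun x => decide (v = key x))) = [] := by
    simp only [List.filter_nil]
    exact pv_flatMap_nil vs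
  have := pv_foldl_insertBy_buckets key vs hvs ts [] hmem
  rw [h0] at this
  simpa using this

-- descending ≤ plus no duplicates gives strictly descending
theorem pv_pairwise_strict (l : List Int) (hle : l.Pairwise (fun a b => b ≤ a))
    (hnd : l.Nodup) : l.Pairwise (fun a b => b < a) := by
  exact (hle.and hnd).imp (fun h => lt_of_le_of_ne h.1 (Ne.symm h.2))

-- ===== VERDICT (by name: the statement is the Claim_ definition above) =====
theorem create_colors_spec : Claim_equal_create_colors := by
  intro n _ hpre
  unfold Spec_create_colors create_colors create_colors_alt
  have hx : (0 : Int) ≤ n + 1 := by rcases hpre with h | h <;> omega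
  rw [pv_cbrt_eq (n+1) hx]
  simp only [pv_channels_eq]
  set c := pvChannelVals (pvCeilPowThird (n+1)) with hc
  set ts := pvProduct c with hts
  set buckets := pvAltBuckets c with hb
  set vs := PySem.List.sorted buckets.keys (fun k => k) true with hvs
  -- vs is strictly descending and carries every priority occurring in ts
  have hnd : vs.Nodup := ((PySem.List.sorted_perm _ _ _).nodup_iff).mpr (pv_buckets_keys_nodup c)
  have hdesc : vs.Pairwise (fun a b => b < a) := by
    apply pv_pairwise_strict _ _ hnd
    simpa using PySem.List.sorted_pairwise_rev buckets.keys (fun k => k)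
  have hmem : ∀ t ∈ ts, pvColorPriority t ∈ vs := by
    intro t ht
    rw [hvs, PySem.List.mem_sorted, pv_buckets_keys_mem]
    exact List.mem_map.mpr ⟨t, ht, rfl⟩
  -- A's sorted list = the buckets concatenated along vs
  rw [pv_sorted_rev_eq_buckets pvColorPriority vs hdesc ts hmem]
  -- B's output loop = the same concatenation
  rw [PySem.List.foldl_append_eq_flatMap]
  simp only [List.nil_append]
  congr 1
  apply pv_flatMap_congr
  intro v _
  rw [pv_buckets_getD]
  apply List.filter_congr
  intro t _
  by_cases h : pvColorPriority t = v
  · simp [h]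
  · simp [h, Ne.symm h]
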